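-- pv_equiv track=rewrite | github.com/kroq86/grav | direct_search.py | embed_defect
-- ===== SOURCE A (Python) =====
-- from typing import List, Tuple, Dict, Set
--
-- def embed_defect(bg: List[int], cut: int, defect: Tuple[int, ...]) -> List[int]:
--     L = len(bg)
--     d = len(defect)
--     start = (cut - (d // 2)) % L
--     cfg = bg[:]
--     for j, b in enumerate(defect):
--         cfg[(start + j) % L] = b
--     return cfg
-- ===== SOURCE B (Python) =====
-- def embed_defect(bg, cut, defect):
--     L = len(bg)
--     d = len(defect)
--     start = (cut - d // 2) % L
--     end = start + d
--     if end <= L: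
--         return bg[:start] + list(defect) + bg[end:]
--     wrap = end - L
--     return list(defect[d - wrap:]) + bg[wrap:start] + list(defect[:d - wrap])
-- ===== Notes on version B (the rewrite author's own statement) =====
-- stated objective: alternative
-- what changed: A copies the background and overwrites d cells one by one with modular index writes; B assembles the result by slice concatenation, splitting the defect in two when its window wraps past the end (bg[:start]+defect+bg[end:], or defect[d-wrap:]+bg[wrap:start]+defect[:d-wrap]); Pre_ excludes empty bg (A raises ZeroDivisionError) and defects longer than the background, where the defect cannot be embedded and several defect cells compete for one position (a duplicate-key-like corner: neither survivor is the specified one), so the two compositions differ.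
-- outside the precondition, e.g. on embed_defect([1, 2], 0, (5, 6, 7)): A returns [6, 7], B returns [6, 7, 5]
import Mathlib
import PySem

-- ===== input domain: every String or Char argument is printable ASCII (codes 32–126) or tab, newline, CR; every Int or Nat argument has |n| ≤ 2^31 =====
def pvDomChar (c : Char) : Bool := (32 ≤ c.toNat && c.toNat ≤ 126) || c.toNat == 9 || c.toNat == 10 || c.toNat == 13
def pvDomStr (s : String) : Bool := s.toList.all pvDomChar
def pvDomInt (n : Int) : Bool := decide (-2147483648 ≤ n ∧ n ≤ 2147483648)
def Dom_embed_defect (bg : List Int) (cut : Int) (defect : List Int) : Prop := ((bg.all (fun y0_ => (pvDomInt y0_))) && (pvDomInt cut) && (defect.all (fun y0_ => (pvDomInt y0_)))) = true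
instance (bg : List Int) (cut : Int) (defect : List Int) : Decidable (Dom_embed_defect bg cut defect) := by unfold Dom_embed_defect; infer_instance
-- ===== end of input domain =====

-- B assembles the window by slicing: the defect (split in two if it wraps past the end) is
-- concatenated with the untouched slices of the background, instead of copying and overwriting
-- positions one by one (objective: alternative decomposition; same asymptotic cost).

-- ===== PORT A =====
-- literal port of A: start = (cut - d//2) % L; cfg = bg[:]; for j, b in enumerate(defect): cfg[(start+j) % L] = b
def embed_defect (bg : List Int) (cut : Int) (defect : List Int) : List Int :=
  let L : Int := bg.length
  let d : Int := defect.length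
  let start : Int := PySem.Int.mod (cut - PySem.Int.floordiv d 2) L
  (PySem.List.enumerate defect 0).foldl
    (fun cfg jb => PySem.List.pySetD cfg (PySem.Int.mod (start + jb.1) L) jb.2) bg

-- ===== PORT B =====
-- literal port of B: end = start + d; if it fits, bg[:start] + defect + bg[end:];
-- otherwise the tail of the defect wraps to the front: defect[d-wrap:] + bg[wrap:start] + defect[:d-wrap]
def embed_defect_alt (bg : List Int) (cut : Int) (defect : List Int) : List Int :=
  let L : Int := bg.length
  let d : Int := defect.length
  let start : Int := PySem.Int.mod (cut - PySem.Int.floordiv d 2) L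
  let e : Int := start + d
  if e ≤ L then
    PySem.List.slice bg none (some start) ++ defect ++ PySem.List.slice bg (some e) none
  else
    let wrap : Int := e - L
    PySem.List.slice defect (some (d - wrap)) none ++
      PySem.List.slice bg (some wrap) (some start) ++
      PySem.List.slice defect none (some (d - wrap))

-- ===== PRECONDITION & SPEC =====
-- Pre_ excludes (i) empty bg, where A raises ZeroDivisionError on `% L`, and (ii) defects longer
-- than the background: there the defect cannot be embedded in the background, several defect cells
-- compete for the same position (as with duplicate keys, neither survivor is the specified one),
-- and B's slice layout returns a different composition.
def Pre_embed_defect (bg : List Int) (cut : Int) (defect : List Int) : Prop :=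
  bg ≠ [] ∧ defect.length ≤ bg.length
instance (bg : List Int) (cut : Int) (defect : List Int) : Decidable (Pre_embed_defect bg cut defect) := by unfold Pre_embed_defect; infer_instance
def pvWitness_embed_defect : List Int × Int × List Int := ([1, 2, 3], 1, [5, 6])

def Spec_embed_defect (bg : List Int) (cut : Int) (defect : List Int) (out : List Int) : Prop := out = embed_defect_alt bg cut defect
instance (bg : List Int) (cut : Int) (defect : List Int) (out : List Int) : Decidable (Spec_embed_defect bg cut defect out) := by unfold Spec_embed_defect; infer_instance

-- ===== CLAIM (what is proved, stated in full; the proofs are below) =====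
def Claim_equal_embed_defect : Prop := ∀ (bg : List Int) (cut : Int) (defect : List Int), Dom_embed_defect bg cut defect → Pre_embed_defect bg cut defect → Spec_embed_defect bg cut defect (embed_defect bg cut defect)

-- ===== LEMMAS AND PROOFS =====

-- reference form both ports are reduced to: pick each cell by its circular offset from start
def pvRef (bg defect : List Int) (s : Nat) : List Int :=
  (List.range bg.length).map (fun i =>
    let off := (i + bg.length - s) % bg.length
    if off < defect.length then defect.getD off 0 else bg.getD i 0)

-- B's selector at position i (A's loop result, characterised pointwise below)
def pvSel (L s : Int) (defect : List Int) (i : Nat) (b : Int) : Int :=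
  let off : Int := PySem.Int.mod ((i : Int) - s) L
  if off < (defect.length : Int) then
    PySem.List.pyGetD defect (off + L * PySem.Int.floordiv ((defect.length : Int) - 1 - off) L) 0
  else b

-- decrementing across a non-multiple does not change the floor quotient
theorem pv_ediv_pred (L a : Int) (hL : 0 < L) (ha : 0 < a) (hnd : ¬ L ∣ a) :
    (a - 1) / L = a / L := by
  have h0 := Int.emod_add_ediv a L
  have hr0 : 0 ≤ a % L := Int.emod_nonneg a (by omega)
  have hrL : a % L < L := Int.emod_lt_of_pos a hL
  have hrne : a % L ≠ 0 := fun h => hnd (Int.dvd_of_emod_eq_zero h)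
  have hc : a / L * L = L * (a / L) := mul_comm _ _
  have : a - 1 = (a % L - 1) + (a / L) * L := by omega
  rw [this, Int.add_mul_ediv_right _ _ (by omega : L ≠ 0),
      Int.ediv_eq_zero_of_lt (by omega) (by omega), zero_add]

-- position i is hit by circular write j iff j ≡ i - s (mod L)
theorem pv_hit_iff (L s i d : Int) (hL : 0 < L) (hi0 : 0 ≤ i) (hiL : i < L) :
    (s + d) % L = i ↔ d % L = (i - s) % L := by
  constructor
  · intro h
    rw [Int.emod_eq_emod_iff_emod_sub_eq_zero]
    have h2 : (s + d) % L = i % L := by rw [h, Int.emod_eq_of_lt hi0 hiL]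
    have h3 := Int.emod_eq_emod_iff_emod_sub_eq_zero.mp h2
    have e : d - (i - s) = s + d - i := by ring
    rw [e]; exact h3
  · intro h
    have h3 := Int.emod_eq_emod_iff_emod_sub_eq_zero.mp h
    have e : d - (i - s) = s + d - i := by ring
    rw [e] at h3
    have h4 : (s + d) % L = i % L := Int.emod_eq_emod_iff_emod_sub_eq_zero.mpr h3
    rwa [Int.emod_eq_of_lt hi0 hiL] at h4

-- A's write loop preserves the length of the configuration
theorem pv_len (L s : Int) (ps : List (Int × Int)) (cfg : List Int) :
    (ps.foldl (fun c jb => PySem.List.pySetD c (PySem.Int.mod (s + jb.1) L) jb.2) cfg).length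
      = cfg.length := by
  induction ps generalizing cfg with
  | nil => rfl
  | cons p ps ih => simp [List.foldl_cons, ih, PySem.List.length_pySetD]

-- the core pointwise characterisation of A's write loop
theorem pv_core (L s : Int) (hL : 0 < L) (bg : List Int) (hlen : (bg.length : Int) = L)
    (defect : List Int) (i : Nat) (hi : i < bg.length) :
    ((PySem.List.enumerate defect 0).foldl
      (fun cfg jb => PySem.List.pySetD cfg (PySem.Int.mod (s + jb.1) L) jb.2) bg)[i]? =
    some (pvSel L s defect i bg[i]) := by
  induction defect using List.reverseRecOn with
  | nil =>
      simp [PySem.List.enumerate, pvSel]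
      have : ¬ PySem.Int.mod ((i : Int) - s) L < (0:Int) := by
        have := PySem.Int.mod_nonneg ((i : Int) - s) hL
        omega
      simp [this]
  | append_singleton df b ih =>
      rw [PySem.List.enumerate_append, List.foldl_append]
      simp only [PySem.List.enumerate_cons, PySem.List.enumerate_nil, List.foldl_cons,
        List.foldl_nil, zero_add]
      rw [PySem.List.pySetD_of_nonneg _ b (PySem.Int.mod_nonneg _ hL)]
      rw [List.getElem?_set]
      have hd0 : (0:Int) ≤ (df.length : Int) := Int.natCast_nonneg _
      have hiL : ((i:Int)) < L := by omega
      have hmt : PySem.Int.mod (s + (df.length : Int)) L = (s + (df.length : Int)) % L :=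
        PySem.Int.mod_eq_emod_of_pos hL
      have ht0 : 0 ≤ (s + (df.length : Int)) % L := Int.emod_nonneg _ (by omega)
      have htL : (s + (df.length : Int)) % L < L := Int.emod_lt_of_pos _ hL
      have hoff0 : 0 ≤ ((i:Int) - s) % L := Int.emod_nonneg _ (by omega)
      have hoffL : ((i:Int) - s) % L < L := Int.emod_lt_of_pos _ hL
      have hkey := pv_hit_iff L s (i:Int) (df.length : Int) hL (by omega) hiL
      by_cases hhit : (s + (df.length : Int)) % L = (i:Int)
      · have hcond : (PySem.Int.mod (s + (df.length : Int)) L).toNat = i := by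
          rw [hmt]; omega
        rw [if_pos hcond, if_pos (by rw [pv_len]; omega)]
        have hoff : ((df.length : Int)) % L = ((i:Int) - s) % L := hkey.mp hhit
        unfold pvSel
        simp only [PySem.Int.mod_eq_emod_of_pos hL, PySem.Int.floordiv_eq_ediv_of_pos hL,
          List.length_append, List.length_cons, List.length_nil]
        push_cast
        have hq0 : 0 ≤ (df.length : Int) / L := Int.ediv_nonneg hd0 hL.le
        have hmul : 0 ≤ L * ((df.length : Int) / L) := mul_nonneg hL.le hq0
        have hdm := Int.emod_add_ediv (df.length : Int) L
        rw [if_pos (by omega)]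
        have e2 : ((i:Int) - s) % L + L * (((df.length : Int) + 1 - 1 - ((i:Int) - s) % L) / L)
            = (df.length : Int) := by
          have e1 : (df.length : Int) + 1 - 1 - ((i:Int) - s) % L
              = L * ((df.length : Int) / L) := by omega
          rw [e1, Int.mul_ediv_cancel_left _ (by omega : L ≠ 0)]; omega
        rw [e2]
        rw [PySem.List.pyGetD_eq_getElem _ _ hd0 (by simp)]
        simp
      · have hcond : ¬ (PySem.Int.mod (s + (df.length : Int)) L).toNat = i := by
          rw [hmt]; omega
        rw [if_neg hcond, ih]
        have hne : ((df.length : Int)) % L ≠ ((i:Int) - s) % L := fun h => hhit (hkey.mpr h)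
        congr 1
        unfold pvSel
        simp only [PySem.Int.mod_eq_emod_of_pos hL, PySem.Int.floordiv_eq_ediv_of_pos hL,
          List.length_append, List.length_cons, List.length_nil]
        push_cast
        by_cases hlt : ((i:Int) - s) % L < (df.length : Int)
        · have ha0 : 0 < (df.length : Int) - ((i:Int) - s) % L := by omega
          have hnd : ¬ L ∣ ((df.length : Int) - ((i:Int) - s) % L) := by
            intro hdvd
            apply hne
            have h3 : ((df.length : Int) - ((i:Int) - s) % L) % L = 0 :=
              Int.emod_eq_zero_of_dvd hdvd
            have h4 : ((df.length : Int)) % L = (((i:Int) - s) % L) % L :=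
              Int.emod_eq_emod_iff_emod_sub_eq_zero.mpr h3
            rwa [Int.emod_eq_of_lt hoff0 hoffL] at h4
          have hdiv : ((df.length : Int) - ((i:Int) - s) % L - 1) / L
              = ((df.length : Int) - ((i:Int) - s) % L) / L :=
            pv_ediv_pred L _ hL ha0 hnd
          have e1 : (df.length : Int) - 1 - ((i:Int) - s) % L
              = (df.length : Int) - ((i:Int) - s) % L - 1 := by ring
          have e3 : (df.length : Int) + 1 - 1 - ((i:Int) - s) % L
              = (df.length : Int) - ((i:Int) - s) % L := by ring
          rw [if_pos hlt, if_pos (by omega), e1, e3, hdiv]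
          have hub : (((df.length : Int) - ((i:Int) - s) % L - 1) / L) * L
              ≤ (df.length : Int) - ((i:Int) - s) % L - 1 :=
            Int.ediv_mul_le _ (by omega)
          have hq0 : 0 ≤ ((df.length : Int) - ((i:Int) - s) % L - 1) / L :=
            Int.ediv_nonneg (by omega) hL.le
          rw [hdiv] at hub hq0
          have hg0 : 0 ≤ L * (((df.length : Int) - ((i:Int) - s) % L) / L) :=
            mul_nonneg hL.le hq0
          have hcm : L * (((df.length : Int) - ((i:Int) - s) % L) / L)
              = (((df.length : Int) - ((i:Int) - s) % L) / L) * L := by ring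
          rw [PySem.List.pyGetD_eq_getElem _ _ (by omega) (by omega),
              PySem.List.pyGetD_eq_getElem _ _ (by omega) (by simp; omega)]
          rw [List.getElem_append_left (by omega)]
        · have hoffd : ¬ ((i:Int) - s) % L < (df.length : Int) + 1 := by
            intro h
            have hoffd' : ((i:Int) - s) % L = (df.length : Int) := by omega
            apply hne
            rw [hoffd', Int.emod_eq_of_lt hd0 (by omega)]
          rw [if_neg hlt, if_neg hoffd]

-- when the defect fits (d ≤ L) the winning write is simply defect[off]
theorem pvSel_small (L s : Int) (hL : 0 < L) (defect : List Int)
    (hd : (defect.length : Int) ≤ L) (i : Nat) (b : Int) :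
    pvSel L s defect i b =
      (if PySem.Int.mod ((i : Int) - s) L < (defect.length : Int)
       then PySem.List.pyGetD defect (PySem.Int.mod ((i : Int) - s) L) 0 else b) := by
  unfold pvSel
  have h0 := PySem.Int.mod_nonneg ((i : Int) - s) hL
  by_cases h : PySem.Int.mod ((i : Int) - s) L < (defect.length : Int)
  · rw [if_pos h, if_pos h, PySem.Int.floordiv_eq_ediv_of_pos hL,
        Int.ediv_eq_zero_of_lt (by omega) (by omega)]
    norm_num
  · rw [if_neg h, if_neg h]

-- the Int offset is the Nat circular offset
theorem pv_off_cast (L s i : Nat) (hs : s < L) (hi : i < L) :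
    PySem.Int.mod ((i : Int) - (s : Int)) (L : Int) = (((i + L - s) % L : Nat) : Int) := by
  rw [PySem.Int.mod_eq_emod_of_pos (by omega)]
  have h1 : ((i : Int) - (s : Int)) = (((i + L - s : Nat) : Int)) - (L : Int) := by
    push_cast [Nat.cast_sub (by omega : s ≤ i + L)]; ring
  rw [h1, Int.sub_emod_right]
  omega

-- A reduces to the reference form
theorem pv_A_ref (bg : List Int) (cut : Int) (defect : List Int)
    (hne : bg ≠ []) (hd : defect.length ≤ bg.length) :
    embed_defect bg cut defect =
      pvRef bg defect (PySem.Int.mod (cut - PySem.Int.floordiv (defect.length : Int) 2)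
        (bg.length : Int)).toNat := by
  have hL : (0:Int) < (bg.length : Int) := by
    cases bg with
    | nil => exact absurd rfl hne
    | cons x xs => simp
  set st : Int := PySem.Int.mod (cut - PySem.Int.floordiv (defect.length : Int) 2)
    (bg.length : Int) with hst
  have hs0 : 0 ≤ st := PySem.Int.mod_nonneg _ hL
  have hsL : st < (bg.length : Int) := PySem.Int.mod_lt _ hL
  apply List.ext_getElem?
  intro i
  by_cases hi : i < bg.length
  · rw [show embed_defect bg cut defect =
        (PySem.List.enumerate defect 0).foldl
          (fun cfg jb => PySem.List.pySetD cfg (PySem.Int.mod (st + jb.1) (bg.length : Int)) jb.2)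
          bg from rfl]
    rw [pv_core (bg.length : Int) st hL bg rfl defect i hi]
    rw [pvSel_small _ _ hL _ (by omega) i _]
    have hcast : st = ((st.toNat : Nat) : Int) := by omega
    rw [hcast, pv_off_cast bg.length st.toNat i (by omega) hi]
    simp only [Int.toNat_natCast]
    simp only [pvRef, List.getElem?_map, List.getElem?_range hi, Option.map_some]
    congr 1
    have hoffN : (i + bg.length - st.toNat) % bg.length < bg.length := Nat.mod_lt _ (by omega)
    by_cases hc : (i + bg.length - st.toNat) % bg.length < defect.length
    · rw [if_pos (by exact_mod_cast hc), if_pos hc]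
      rw [PySem.List.pyGetD_natCast]
    · rw [if_neg (by exact_mod_cast hc), if_neg hc, List.getD_eq_getElem _ _ hi]
  · have h1 : (embed_defect bg cut defect).length = bg.length := pv_len _ _ _ _
    rw [List.getElem?_eq_none (by omega),
        List.getElem?_eq_none (by simp [pvRef]; omega)]

-- B reduces to the reference form
theorem pv_B_ref (bg : List Int) (cut : Int) (defect : List Int)
    (hne : bg ≠ []) (hd : defect.length ≤ bg.length) :
    embed_defect_alt bg cut defect =
      pvRef bg defect (PySem.Int.mod (cut - PySem.Int.floordiv (defect.length : Int) 2)
        (bg.length : Int)).toNat := by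
  have hL : (0:Int) < (bg.length : Int) := by
    cases bg with
    | nil => exact absurd rfl hne
    | cons x xs => simp
  set st : Int := PySem.Int.mod (cut - PySem.Int.floordiv (defect.length : Int) 2)
    (bg.length : Int) with hst
  have hs0 : 0 ≤ st := PySem.Int.mod_nonneg _ hL
  have hsL : st < (bg.length : Int) := PySem.Int.mod_lt _ hL
  set sN : Nat := st.toNat with hsN
  have hcast : st = ((sN : Nat) : Int) := by omega
  have hsNL : sN < bg.length := by omega
  by_cases hfit : st + (defect.length : Int) ≤ (bg.length : Int)
  · -- no wrap: bg.take sN ++ defect ++ bg.drop (sN + d)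
    have hB : embed_defect_alt bg cut defect =
        bg.take sN ++ defect ++ bg.drop (sN + defect.length) := by
      rw [show embed_defect_alt bg cut defect =
          (if st + (defect.length : Int) ≤ (bg.length : Int) then
            PySem.List.slice bg none (some st) ++ defect ++
              PySem.List.slice bg (some (st + (defect.length : Int))) none
          else
            PySem.List.slice defect (some ((defect.length : Int) -
                (st + (defect.length : Int) - (bg.length : Int)))) none ++
              PySem.List.slice bg (some (st + (defect.length : Int) - (bg.length : Int)))
                (some st) ++
              PySem.List.slice defect none (some ((defect.length : Int) -
                (st + (defect.length : Int) - (bg.length : Int))))) from rfl]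
      rw [if_pos hfit, hcast,
          show ((sN : Nat) : Int) + (defect.length : Int) = (((sN + defect.length : Nat)) : Int)
            by push_cast; ring,
          PySem.List.slice_to_natCast, PySem.List.slice_from_natCast]
    rw [hB]
    apply List.ext_getElem?
    intro i
    by_cases hi : i < bg.length
    · have hlen1 : (bg.take sN).length = sN := by simp; omega
      simp only [pvRef, List.getElem?_map, List.getElem?_range hi, Option.map_some,
        List.getElem?_append, List.length_append, hlen1]
      by_cases h1 : i < sN
      · rw [if_pos (by omega), if_pos h1, List.getElem?_take, if_pos h1,
            List.getElem?_eq_getElem hi]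
        have hoff : (i + bg.length - sN) % bg.length = i + bg.length - sN :=
          Nat.mod_eq_of_lt (by omega)
        rw [hoff] at *
        rw [if_neg (by omega), List.getD_eq_getElem _ _ hi]
      · by_cases h2 : i < sN + defect.length
        · rw [if_pos (by omega), if_neg h1,
              List.getElem?_eq_getElem (by omega : i - sN < defect.length)]
          have hoff : (i + bg.length - sN) % bg.length = i - sN := by
            rw [show i + bg.length - sN = (i - sN) + bg.length by omega,
                Nat.add_mod_right, Nat.mod_eq_of_lt (by omega)]
          rw [hoff, if_pos (by omega), List.getD_eq_getElem _ _ (by omega)]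
        · rw [if_neg (by omega), List.getElem?_drop,
              show sN + defect.length + (i - (sN + defect.length)) = i by omega,
              List.getElem?_eq_getElem hi]
          have hoff : (i + bg.length - sN) % bg.length = i - sN := by
            rw [show i + bg.length - sN = (i - sN) + bg.length by omega,
                Nat.add_mod_right, Nat.mod_eq_of_lt (by omega)]
          rw [hoff, if_neg (by omega), List.getD_eq_getElem _ _ hi]
    · rw [List.getElem?_eq_none (by simp; omega),
          List.getElem?_eq_none (by simp [pvRef]; omega)]
  · -- wrap: defect.drop (d - w) ++ (bg.drop w).take (sN - w) ++ defect.take (d - w)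
    set wN : Nat := sN + defect.length - bg.length with hwN
    have hw1 : 0 < wN := by omega
    have hw2 : wN ≤ sN := by omega
    have hw3 : defect.length - wN = bg.length - sN := by omega
    have hB : embed_defect_alt bg cut defect =
        defect.drop (defect.length - wN) ++ (bg.drop wN).take (sN - wN) ++
          defect.take (defect.length - wN) := by
      rw [show embed_defect_alt bg cut defect =
          (if st + (defect.length : Int) ≤ (bg.length : Int) then
            PySem.List.slice bg none (some st) ++ defect ++
              PySem.List.slice bg (some (st + (defect.length : Int))) none
          else
            PySem.List.slice defect (some ((defect.length : Int) -
                (st + (defect.length : Int) - (bg.length : Int)))) none ++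
              PySem.List.slice bg (some (st + (defect.length : Int) - (bg.length : Int)))
                (some st) ++
              PySem.List.slice defect none (some ((defect.length : Int) -
                (st + (defect.length : Int) - (bg.length : Int))))) from rfl]
      rw [if_neg hfit,
          show (defect.length : Int) - (st + (defect.length : Int) - (bg.length : Int))
            = (((defect.length - wN : Nat)) : Int) by push_cast [hwN]; omega,
          show st + (defect.length : Int) - (bg.length : Int) = ((wN : Nat) : Int)
            by push_cast [hwN]; omega,
          hcast, PySem.List.slice_from_natCast, PySem.List.slice_to_natCast,
          PySem.List.slice_natCast]
    rw [hB]
    apply List.ext_getElem?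
    intro i
    by_cases hi : i < bg.length
    · have hlen1 : (defect.drop (defect.length - wN)).length = wN := by simp; omega
      have hlen2 : ((bg.drop wN).take (sN - wN)).length = sN - wN := by simp; omega
      simp only [pvRef, List.getElem?_map, List.getElem?_range hi, Option.map_some,
        List.getElem?_append, List.length_append, hlen1, hlen2]
      by_cases h1 : i < wN
      · rw [if_pos (by omega), if_pos (by omega), List.getElem?_drop,
            List.getElem?_eq_getElem (by omega : defect.length - wN + i < defect.length)]
        have hoff : (i + bg.length - sN) % bg.length = i + bg.length - sN :=
          Nat.mod_eq_of_lt (by omega)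
        rw [hoff, if_pos (by omega), List.getD_eq_getElem _ _ (by omega)]
        congr 2
        omega
      · by_cases h2 : i < sN
        · rw [if_pos (by omega), if_neg (by omega), List.getElem?_take, if_pos (by omega),
              List.getElem?_drop, show wN + (i - wN) = i by omega,
              List.getElem?_eq_getElem hi]
          have hoff : (i + bg.length - sN) % bg.length = i + bg.length - sN :=
            Nat.mod_eq_of_lt (by omega)
          rw [hoff, if_neg (by omega), List.getD_eq_getElem _ _ hi]
        · rw [if_neg (by omega), List.getElem?_take, if_pos (by omega),
              List.getElem?_eq_getElem (by omega : i - (wN + (sN - wN)) < defect.length)]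
          have hoff : (i + bg.length - sN) % bg.length = i - sN := by
            rw [show i + bg.length - sN = (i - sN) + bg.length by omega,
                Nat.add_mod_right, Nat.mod_eq_of_lt (by omega)]
          rw [hoff, if_pos (by omega), List.getD_eq_getElem _ _ (by omega)]
          simp only [show i - (wN + (sN - wN)) = i - sN from by omega]
    · rw [List.getElem?_eq_none (by simp; omega),
          List.getElem?_eq_none (by simp [pvRef]; omega)]

-- ===== VERDICT (by name: the statement is the Claim_ definition above) =====
theorem embed_defect_spec : Claim_equal_embed_defect := by
  intro bg cut defect _ hpre
  obtain ⟨hne, hd⟩ := hpre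
  unfold Spec_embed_defect
  rw [pv_A_ref bg cut defect hne hd, pv_B_ref bg cut defect hne hd]
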